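-- pv_equiv track=rewrite | github.com/ameliabrennan/networks | NetworkMapV1_3.py | create_get_program_details_qry
-- ===== SOURCE A (Python) =====
-- def create_get_program_details_qry(prg_code=[], school=None, college=None, acad_career=None):
--     qry = 'SELECT * ' \
--           'FROM Program_details '
--
--     # Add WHERE statements if necessary
--     if (len(prg_code) > 0
--         or school != None
--         or college != None
--         or acad_career != None):
--         qry += 'WHERE ( '
--
--         if len(prg_code) > 0:
--             qry += ' ( '
--             # Add each program
--             for prg in prg_code:
--                 qry += 'program_code = "%s" OR ' % prg
--             # remove last 'OR '
--             qry = qry[:-3]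
--             qry += ' ) AND '
--
--         if school != None:
--             qry += ' program_school = "%s" AND ' % school
--
--         if college != None:
--             qry += ' program_college = "%s" AND ' % college
--
--         if acad_career != None:
--             qry += ' program_acad_career = "%s" AND ' % acad_career
--
--         # remove last 'AND '
--         qry = qry[:-4]
--         qry += ' ) '
--
--     qry += 'ORDER BY program_code '
--     return qry
-- ===== SOURCE B (Python) =====
-- def create_get_program_details_qry(prg_code=[], school=None, college=None, acad_career=None):
--     conditions = []
--     if len(prg_code) > 0:
--         conditions.append(' ( ' + ' OR '.join('program_code = "%s"' % p for p in prg_code) + '  ) ')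
--     if school != None:
--         conditions.append(' program_school = "%s" ' % school)
--     if college != None:
--         conditions.append(' program_college = "%s" ' % college)
--     if acad_career != None:
--         conditions.append(' program_acad_career = "%s" ' % acad_career)
--     where = 'WHERE ( ' + 'AND '.join(conditions) + ' ) ' if conditions else ''
--     return 'SELECT * FROM Program_details ' + where + 'ORDER BY program_code '
-- ===== Notes on version B (the rewrite author's own statement) =====
-- stated objective: simpler
-- what changed: Replaces A's append-then-slice sentinel pattern (concatenate 'OR '/'AND '-terminated pieces into one growing string, then trim the trailing separator with qry[:-3]/qry[:-4]) by building an explicit list of WHERE-condition strings and assembling the query with str.join.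
import Mathlib
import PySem

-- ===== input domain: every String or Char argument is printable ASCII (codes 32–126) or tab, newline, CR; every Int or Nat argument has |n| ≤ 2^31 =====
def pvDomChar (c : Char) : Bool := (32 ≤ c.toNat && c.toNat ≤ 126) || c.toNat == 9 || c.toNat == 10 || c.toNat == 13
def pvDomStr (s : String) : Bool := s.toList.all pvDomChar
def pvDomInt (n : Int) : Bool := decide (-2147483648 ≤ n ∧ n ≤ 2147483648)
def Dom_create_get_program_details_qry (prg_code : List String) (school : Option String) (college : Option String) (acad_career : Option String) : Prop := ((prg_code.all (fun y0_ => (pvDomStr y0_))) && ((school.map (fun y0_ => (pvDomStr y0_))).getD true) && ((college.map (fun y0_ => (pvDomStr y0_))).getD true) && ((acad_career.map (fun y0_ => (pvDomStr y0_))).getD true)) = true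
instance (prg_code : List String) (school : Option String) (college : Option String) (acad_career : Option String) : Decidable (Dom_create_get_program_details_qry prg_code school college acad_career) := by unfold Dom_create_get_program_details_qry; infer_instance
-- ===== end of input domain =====

-- B replaces A's append-then-trim sentinel pattern (concatenate 'OR '/'AND '-terminated pieces, then slice the
-- trailing separator off) by building a list of condition strings and joining them; objective: simpler.

-- ===== PORT A =====
def create_get_program_details_qry (prg_code : List String) (school : Option String) (college : Option String) (acad_career : Option String) : String :=
  let qry := "SELECT * " ++ "FROM Program_details "
  let qry :=
    if prg_code.length > 0 ∨ school ≠ none ∨ college ≠ none ∨ acad_career ≠ none then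
      let qry := qry ++ "WHERE ( "
      let qry :=
        if prg_code.length > 0 then
          let qry := prg_code.foldl (fun q prg => q ++ "program_code = \"" ++ prg ++ "\" OR ") (qry ++ " ( ")
          let qry := PySem.Str.slice qry none (some (-3))   -- qry[:-3]
          qry ++ " ) AND "
        else qry
      let qry := match school with
        | some s => qry ++ " program_school = \"" ++ s ++ "\" AND "
        | none => qry
      let qry := match college with
        | some c => qry ++ " program_college = \"" ++ c ++ "\" AND "
        | none => qry
      let qry := match acad_career with
        | some a => qry ++ " program_acad_career = \"" ++ a ++ "\" AND "
        | none => qry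
      let qry := PySem.Str.slice qry none (some (-4))   -- qry[:-4]
      qry ++ " ) "
    else qry
  qry ++ "ORDER BY program_code "

-- ===== PORT B =====
def create_get_program_details_qry_alt (prg_code : List String) (school : Option String) (college : Option String) (acad_career : Option String) : String :=
  let conditions : List String := []
  let conditions :=
    if prg_code.length > 0 then
      conditions ++ [" ( " ++ PySem.Str.join " OR " (prg_code.map (fun p => "program_code = \"" ++ p ++ "\"")) ++ "  ) "]
    else conditions
  let conditions := match school with
    | some s => conditions ++ [" program_school = \"" ++ s ++ "\" "]
    | none => conditions
  let conditions := match college with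
    | some c => conditions ++ [" program_college = \"" ++ c ++ "\" "]
    | none => conditions
  let conditions := match acad_career with
    | some a => conditions ++ [" program_acad_career = \"" ++ a ++ "\" "]
    | none => conditions
  let whereClause := if conditions ≠ [] then "WHERE ( " ++ PySem.Str.join "AND " conditions ++ " ) " else ""
  "SELECT * FROM Program_details " ++ whereClause ++ "ORDER BY program_code "

-- ===== PRECONDITION & SPEC =====
def Spec_create_get_program_details_qry (prg_code : List String) (school : Option String) (college : Option String) (acad_career : Option String) (out : String) : Prop := out = create_get_program_details_qry_alt prg_code school college acad_career
instance (prg_code : List String) (school : Option String) (college : Option String) (acad_career : Option String) (out : String) : Decidable (Spec_create_get_program_details_qry prg_code school college acad_career out) := by unfold Spec_create_get_program_details_qry; infer_instance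

-- ===== CLAIM (what is proved, stated in full; the proofs are below) =====
def Claim_equal_create_get_program_details_qry : Prop := ∀ (prg_code : List String) (school : Option String) (college : Option String) (acad_career : Option String), Dom_create_get_program_details_qry prg_code school college acad_career → Spec_create_get_program_details_qry prg_code school college acad_career (create_get_program_details_qry prg_code school college acad_career)

-- ===== LEMMAS AND PROOFS =====

-- proof-side helper: ''.join(cs) — concatenation of a list of strings
def pvCat (cs : List String) : String := PySem.Str.join "" cs

theorem pv_joinNil (l : List (List Char)) : PySem.Chars.join [] l = l.flatten := by
  induction l with
  | nil => simp [PySem.Chars.join_nil]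
  | cons b bs ih =>
      cases bs with
      | nil => simp [PySem.Chars.join_singleton]
      | cons c cs => rw [PySem.Chars.join_cons_cons]; simp_all

theorem pv_catL (cs : List String) : (pvCat cs).toList = (cs.map String.toList).flatten := by
  unfold pvCat
  rw [PySem.Str.toList_join]
  exact pv_joinNil _

-- literal char-list expansions (all rfl)
theorem pv_lit_or : " OR ".toList = [' ', 'O', 'R', ' '] := rfl
theorem pv_lit_and : "AND ".toList = ['A', 'N', 'D', ' '] := rfl
theorem pv_lit1 : "\" OR ".toList = ['"', ' ', 'O', 'R', ' '] := rfl

-- the loop over prg_code: each iteration appends 'program_code = "%s" OR '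
theorem pv_foldl (l : List String) (p : String) (s : String) :
    ((p :: l).foldl (fun q prg => q ++ "program_code = \"" ++ prg ++ "\" OR ") s).toList
      = (s.toList ++ PySem.Chars.join " OR ".toList
          ((p :: l).map (fun t => ("program_code = \"" ++ t ++ "\"").toList))) ++ " OR ".toList := by
  induction l generalizing s p with
  | nil => simp [PySem.Chars.join_singleton, pv_lit_or, pv_lit1]
  | cons q l ih =>
      simp only [List.foldl_cons] at *
      rw [ih]
      simp only [List.map_cons]
      rw [PySem.Chars.join_cons_cons]
      simp [pv_lit_or, pv_lit1]

-- qry[:-3] where qry ends in ' OR '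
theorem pv_trim3 (w : List Char) :
    PySem.List.slice (w ++ " OR ".toList) none (some (-3)) = w ++ [' '] := by
  rw [PySem.List.slice_to_neg_ofNat _ 3 (by omega)]
  have h : (w ++ " OR ".toList).length - 3 = w.length + 1 := by simp [pv_lit_or]
  rw [h, List.take_length_add_append]
  rfl

-- qry[:-4] where qry ends in 'AND '
theorem pv_trim4 (w : List Char) :
    PySem.List.slice (w ++ "AND ".toList) none (some (-4)) = w := by
  rw [PySem.List.slice_to_neg_ofNat _ 4 (by omega)]
  have h : (w ++ "AND ".toList).length - 4 = w.length + 0 := by simp [pv_lit_and]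
  rw [h, List.take_length_add_append]
  simp

-- concatenating 'AND '-terminated clause bodies = join with 'AND ' plus one trailing 'AND '
theorem pv_glueS (b : String) (bs : List String) :
    ((b :: bs).map (fun c => c.toList ++ "AND ".toList)).flatten
      = PySem.Chars.join "AND ".toList ((b :: bs).map String.toList) ++ "AND ".toList := by
  induction bs generalizing b with
  | nil => simp [PySem.Chars.join_singleton]
  | cons c bs ih =>
      simp only [List.map_cons] at *
      rw [List.flatten_cons, ih, PySem.Chars.join_cons_cons]
      simp

-- the prg_code clause: A's loop + trailing slice [:-3] equals B's join-built condition
theorem pv_pc (q : String) (p : String) (l : List String) :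
    PySem.Str.slice ((p :: l).foldl (fun q prg => q ++ "program_code = \"" ++ prg ++ "\" OR ") (q ++ " ( ")) none (some (-3)) ++ " ) AND "
      = q ++ pvCat (([" ( " ++ PySem.Str.join " OR " ((p :: l).map (fun p => "program_code = \"" ++ p ++ "\"")) ++ "  ) "]).map (fun c => c ++ "AND ")) := by
  apply String.toList_inj.mp
  simp only [String.toList_append, PySem.Str.toList_slice, PySem.Chars.slice_eq_listSlice]
  rw [pv_foldl, pv_trim3]
  simp [pv_catL, PySem.Str.toList_join, List.map_map, Function.comp_def]

-- the three option clauses, as pvCat pieces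
theorem pv_s (q : String) (s : String) :
    q ++ " program_school = \"" ++ s ++ "\" AND "
      = q ++ pvCat ([" program_school = \"" ++ s ++ "\" "].map (fun c => c ++ "AND ")) := by
  apply String.toList_inj.mp
  simp [pv_catL]

theorem pv_c (q : String) (c : String) :
    q ++ " program_college = \"" ++ c ++ "\" AND "
      = q ++ pvCat ([" program_college = \"" ++ c ++ "\" "].map (fun c => c ++ "AND ")) := by
  apply String.toList_inj.mp
  simp [pv_catL]

theorem pv_a (q : String) (a : String) :
    q ++ " program_acad_career = \"" ++ a ++ "\" AND "
      = q ++ pvCat ([" program_acad_career = \"" ++ a ++ "\" "].map (fun c => c ++ "AND ")) := by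
  apply String.toList_inj.mp
  simp [pv_catL]

-- merging successively appended clause groups
theorem pv_merge (q : String) (l1 l2 : List String) :
    (q ++ pvCat (l1.map (fun c => c ++ "AND "))) ++ pvCat (l2.map (fun c => c ++ "AND "))
      = q ++ pvCat ((l1 ++ l2).map (fun c => c ++ "AND ")) := by
  apply String.toList_inj.mp
  simp [pv_catL]

-- the final slice [:-4]: trimming the last 'AND ' turns concatenation into a join
theorem pv_keyS (q0 : String) (b : String) (bs : List String) :
    PySem.Str.slice (q0 ++ pvCat (((b :: bs)).map (fun c => c ++ "AND "))) none (some (-4))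
      = q0 ++ PySem.Str.join "AND " (b :: bs) := by
  apply String.toList_inj.mp
  simp only [String.toList_append, PySem.Str.toList_slice, PySem.Chars.slice_eq_listSlice,
    pv_catL, List.map_map, Function.comp_def]
  rw [pv_glueS, ← List.append_assoc, pv_trim4, PySem.Str.toList_join]

-- ===== VERDICT (by name: the statement is the Claim_ definition above) =====
theorem create_get_program_details_qry_spec : Claim_equal_create_get_program_details_qry := by
  intro prg_code school college acad_career _
  unfold Spec_create_get_program_details_qry
  rcases school with _ | sv <;> rcases college with _ | cv <;> rcases acad_career with _ | av <;> rcases prg_code with _ | ⟨p, l⟩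
  · decide
  · simp only [create_get_program_details_qry, create_get_program_details_qry_alt]
    have hc1 : (p :: l).length > 0 ∨ (none : Option String) ≠ none ∨ (none : Option String) ≠ none ∨ (none : Option String) ≠ none := by simp
    rw [if_pos hc1]
    have hc2 : (p :: l).length > 0 := by simp
    rw [if_pos hc2, if_pos hc2]
    simp only [List.nil_append]
    rw [if_pos (List.cons_ne_nil _ _)]
    rw [pv_pc]
    rw [pv_keyS]
    apply String.toList_inj.mp
    simp only [String.toList_append, List.append_assoc]
    rfl
  · simp only [create_get_program_details_qry, create_get_program_details_qry_alt]
    have hc1 : ([] : List String).length > 0 ∨ (none : Option String) ≠ none ∨ (none : Option String) ≠ none ∨ some av ≠ none := by simp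
    rw [if_pos hc1]
    have hc2 : ¬(([] : List String).length > 0) := by simp
    rw [if_neg hc2, if_neg hc2]
    simp only [List.nil_append]
    rw [if_pos (List.cons_ne_nil _ _)]
    rw [pv_a]
    rw [pv_keyS]
    apply String.toList_inj.mp
    simp only [String.toList_append, List.append_assoc]
    rfl
  · simp only [create_get_program_details_qry, create_get_program_details_qry_alt]
    have hc1 : (p :: l).length > 0 ∨ (none : Option String) ≠ none ∨ (none : Option String) ≠ none ∨ some av ≠ none := by simp
    rw [if_pos hc1]
    have hc2 : (p :: l).length > 0 := by simp
    rw [if_pos hc2, if_pos hc2]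
    simp only [List.nil_append, List.cons_append]
    rw [if_pos (List.cons_ne_nil _ _)]
    rw [pv_pc]
    rw [pv_a]
    rw [pv_merge]
    simp only [List.cons_append, List.nil_append]
    rw [pv_keyS]
    apply String.toList_inj.mp
    simp only [String.toList_append, List.append_assoc]
    rfl
  · simp only [create_get_program_details_qry, create_get_program_details_qry_alt]
    have hc1 : ([] : List String).length > 0 ∨ (none : Option String) ≠ none ∨ some cv ≠ none ∨ (none : Option String) ≠ none := by simp
    rw [if_pos hc1]
    have hc2 : ¬(([] : List String).length > 0) := by simp
    rw [if_neg hc2, if_neg hc2]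
    simp only [List.nil_append]
    rw [if_pos (List.cons_ne_nil _ _)]
    rw [pv_c]
    rw [pv_keyS]
    apply String.toList_inj.mp
    simp only [String.toList_append, List.append_assoc]
    rfl
  · simp only [create_get_program_details_qry, create_get_program_details_qry_alt]
    have hc1 : (p :: l).length > 0 ∨ (none : Option String) ≠ none ∨ some cv ≠ none ∨ (none : Option String) ≠ none := by simp
    rw [if_pos hc1]
    have hc2 : (p :: l).length > 0 := by simp
    rw [if_pos hc2, if_pos hc2]
    simp only [List.nil_append, List.cons_append]
    rw [if_pos (List.cons_ne_nil _ _)]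
    rw [pv_pc]
    rw [pv_c]
    rw [pv_merge]
    simp only [List.cons_append, List.nil_append]
    rw [pv_keyS]
    apply String.toList_inj.mp
    simp only [String.toList_append, List.append_assoc]
    rfl
  · simp only [create_get_program_details_qry, create_get_program_details_qry_alt]
    have hc1 : ([] : List String).length > 0 ∨ (none : Option String) ≠ none ∨ some cv ≠ none ∨ some av ≠ none := by simp
    rw [if_pos hc1]
    have hc2 : ¬(([] : List String).length > 0) := by simp
    rw [if_neg hc2, if_neg hc2]
    simp only [List.nil_append, List.cons_append]
    rw [if_pos (List.cons_ne_nil _ _)]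
    rw [pv_c]
    rw [pv_a]
    rw [pv_merge]
    simp only [List.cons_append, List.nil_append]
    rw [pv_keyS]
    apply String.toList_inj.mp
    simp only [String.toList_append, List.append_assoc]
    rfl
  · simp only [create_get_program_details_qry, create_get_program_details_qry_alt]
    have hc1 : (p :: l).length > 0 ∨ (none : Option String) ≠ none ∨ some cv ≠ none ∨ some av ≠ none := by simp
    rw [if_pos hc1]
    have hc2 : (p :: l).length > 0 := by simp
    rw [if_pos hc2, if_pos hc2]
    simp only [List.nil_append, List.cons_append]
    rw [if_pos (List.cons_ne_nil _ _)]
    rw [pv_pc]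
    rw [pv_c]
    rw [pv_a]
    rw [pv_merge]
    rw [pv_merge]
    simp only [List.cons_append, List.nil_append]
    rw [pv_keyS]
    apply String.toList_inj.mp
    simp only [String.toList_append, List.append_assoc]
    rfl
  · simp only [create_get_program_details_qry, create_get_program_details_qry_alt]
    have hc1 : ([] : List String).length > 0 ∨ some sv ≠ none ∨ (none : Option String) ≠ none ∨ (none : Option String) ≠ none := by simp
    rw [if_pos hc1]
    have hc2 : ¬(([] : List String).length > 0) := by simp
    rw [if_neg hc2, if_neg hc2]
    simp only [List.nil_append]
    rw [if_pos (List.cons_ne_nil _ _)]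
    rw [pv_s]
    rw [pv_keyS]
    apply String.toList_inj.mp
    simp only [String.toList_append, List.append_assoc]
    rfl
  · simp only [create_get_program_details_qry, create_get_program_details_qry_alt]
    have hc1 : (p :: l).length > 0 ∨ some sv ≠ none ∨ (none : Option String) ≠ none ∨ (none : Option String) ≠ none := by simp
    rw [if_pos hc1]
    have hc2 : (p :: l).length > 0 := by simp
    rw [if_pos hc2, if_pos hc2]
    simp only [List.nil_append, List.cons_append]
    rw [if_pos (List.cons_ne_nil _ _)]
    rw [pv_pc]
    rw [pv_s]
    rw [pv_merge]
    simp only [List.cons_append, List.nil_append]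
    rw [pv_keyS]
    apply String.toList_inj.mp
    simp only [String.toList_append, List.append_assoc]
    rfl
  · simp only [create_get_program_details_qry, create_get_program_details_qry_alt]
    have hc1 : ([] : List String).length > 0 ∨ some sv ≠ none ∨ (none : Option String) ≠ none ∨ some av ≠ none := by simp
    rw [if_pos hc1]
    have hc2 : ¬(([] : List String).length > 0) := by simp
    rw [if_neg hc2, if_neg hc2]
    simp only [List.nil_append, List.cons_append]
    rw [if_pos (List.cons_ne_nil _ _)]
    rw [pv_s]
    rw [pv_a]
    rw [pv_merge]
    simp only [List.cons_append, List.nil_append]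
    rw [pv_keyS]
    apply String.toList_inj.mp
    simp only [String.toList_append, List.append_assoc]
    rfl
  · simp only [create_get_program_details_qry, create_get_program_details_qry_alt]
    have hc1 : (p :: l).length > 0 ∨ some sv ≠ none ∨ (none : Option String) ≠ none ∨ some av ≠ none := by simp
    rw [if_pos hc1]
    have hc2 : (p :: l).length > 0 := by simp
    rw [if_pos hc2, if_pos hc2]
    simp only [List.nil_append, List.cons_append]
    rw [if_pos (List.cons_ne_nil _ _)]
    rw [pv_pc]
    rw [pv_s]
    rw [pv_a]
    rw [pv_merge]
    rw [pv_merge]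
    simp only [List.cons_append, List.nil_append]
    rw [pv_keyS]
    apply String.toList_inj.mp
    simp only [String.toList_append, List.append_assoc]
    rfl
  · simp only [create_get_program_details_qry, create_get_program_details_qry_alt]
    have hc1 : ([] : List String).length > 0 ∨ some sv ≠ none ∨ some cv ≠ none ∨ (none : Option String) ≠ none := by simp
    rw [if_pos hc1]
    have hc2 : ¬(([] : List String).length > 0) := by simp
    rw [if_neg hc2, if_neg hc2]
    simp only [List.nil_append, List.cons_append]
    rw [if_pos (List.cons_ne_nil _ _)]
    rw [pv_s]
    rw [pv_c]
    rw [pv_merge]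
    simp only [List.cons_append, List.nil_append]
    rw [pv_keyS]
    apply String.toList_inj.mp
    simp only [String.toList_append, List.append_assoc]
    rfl
  · simp only [create_get_program_details_qry, create_get_program_details_qry_alt]
    have hc1 : (p :: l).length > 0 ∨ some sv ≠ none ∨ some cv ≠ none ∨ (none : Option String) ≠ none := by simp
    rw [if_pos hc1]
    have hc2 : (p :: l).length > 0 := by simp
    rw [if_pos hc2, if_pos hc2]
    simp only [List.nil_append, List.cons_append]
    rw [if_pos (List.cons_ne_nil _ _)]
    rw [pv_pc]
    rw [pv_s]
    rw [pv_c]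
    rw [pv_merge]
    rw [pv_merge]
    simp only [List.cons_append, List.nil_append]
    rw [pv_keyS]
    apply String.toList_inj.mp
    simp only [String.toList_append, List.append_assoc]
    rfl
  · simp only [create_get_program_details_qry, create_get_program_details_qry_alt]
    have hc1 : ([] : List String).length > 0 ∨ some sv ≠ none ∨ some cv ≠ none ∨ some av ≠ none := by simp
    rw [if_pos hc1]
    have hc2 : ¬(([] : List String).length > 0) := by simp
    rw [if_neg hc2, if_neg hc2]
    simp only [List.nil_append, List.cons_append]
    rw [if_pos (List.cons_ne_nil _ _)]
    rw [pv_s]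
    rw [pv_c]
    rw [pv_a]
    rw [pv_merge]
    rw [pv_merge]
    simp only [List.cons_append, List.nil_append]
    rw [pv_keyS]
    apply String.toList_inj.mp
    simp only [String.toList_append, List.append_assoc]
    rfl
  · simp only [create_get_program_details_qry, create_get_program_details_qry_alt]
    have hc1 : (p :: l).length > 0 ∨ some sv ≠ none ∨ some cv ≠ none ∨ some av ≠ none := by simp
    rw [if_pos hc1]
    have hc2 : (p :: l).length > 0 := by simp
    rw [if_pos hc2, if_pos hc2]
    simp only [List.nil_append, List.cons_append]
    rw [if_pos (List.cons_ne_nil _ _)]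
    rw [pv_pc]
    rw [pv_s]
    rw [pv_c]
    rw [pv_a]
    rw [pv_merge]
    rw [pv_merge]
    rw [pv_merge]
    simp only [List.cons_append, List.nil_append]
    rw [pv_keyS]
    apply String.toList_inj.mp
    simp only [String.toList_append, List.append_assoc]
    rfl
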